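-- pv_equiv track=rewrite | github.com/kamilkulik/algo | src/DYNAMIC_PROGRAMMING/all_construct/all_construct.py | all_construct_tabularised
-- ===== SOURCE A (Python) =====
-- def all_construct_tabularised(target, wordbank):
--     table = [[] for _ in range(len(target) + 1)]
--     table[0] = [[]]
--
--     for i in range(len(table)):
--         if len(table[i]):
--             current_substring = target[i:]
--             for word in wordbank:
--                 if i + len(word) <= len(target) and current_substring.startswith(word):
--
--                     combination = map(lambda substring: substring + [word], table[i])
--                     combination_final = [element for element in combination]
--
--                     table[i + len(word)] += combination_final
--
--     return table[-1]
-- ===== SOURCE B (Python) =====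
-- def all_construct_tabularised(target, wordbank):
--     # Top-down memoized recursion on prefixes: f(j) = all ways to build target[:j].
--     # Last-word start position i is scanned in ascending order, words in wordbank order,
--     # so the result order matches the bottom-up table's order.  A set of word lengths
--     # lets start positions no word can fill be skipped.
--     memo = {0: [[]]}
--     lens = set(len(word) for word in wordbank)
--
--     def f(j):
--         if j in memo:
--             return memo[j]
--         ways = []
--         for i in range(j):
--             if j - i in lens:
--                 for word in wordbank:
--                     if len(word) == j - i and target.startswith(word, i):
--                         ways.extend(way + [word] for way in f(i))
--         memo[j] = ways
--         return ways
--
--     return f(len(target))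
-- ===== Notes on version B (the rewrite author's own statement) =====
-- stated objective: alternative
-- what changed: Replaces the bottom-up mutable table (scattering each table[i] forward into table[i+len(word)]) by a top-down memoized recursion f(j) gathering all ways to build the prefix target[:j] from last-word start positions i < j, using a set of word lengths to skip start positions no word can fill.
-- outside the precondition, e.g. on all_construct_tabularised('', ['']): A returns [[], ['']], B returns [[]]; on all_construct_tabularised('aa', ['a', '']): A returns [['a', 'a'], ['a', 'a', '']], B returns [['a', 'a']]
import Mathlib
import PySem

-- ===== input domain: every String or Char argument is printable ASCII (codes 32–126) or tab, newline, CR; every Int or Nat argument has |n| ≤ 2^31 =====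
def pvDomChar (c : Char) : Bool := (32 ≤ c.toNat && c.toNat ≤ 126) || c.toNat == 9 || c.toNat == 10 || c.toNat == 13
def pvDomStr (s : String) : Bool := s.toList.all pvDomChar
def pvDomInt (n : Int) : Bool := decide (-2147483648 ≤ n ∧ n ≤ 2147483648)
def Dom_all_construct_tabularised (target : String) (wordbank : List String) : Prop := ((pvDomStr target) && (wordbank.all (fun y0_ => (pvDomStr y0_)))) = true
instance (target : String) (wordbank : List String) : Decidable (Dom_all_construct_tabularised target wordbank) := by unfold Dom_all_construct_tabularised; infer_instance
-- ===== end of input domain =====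

-- B replaces A's bottom-up mutable table by a top-down memoized recursion on prefixes
-- (objective: alternative decomposition, same cost).

-- ===== PORT A =====
-- inner 'for word in wordbank' loop of A: scatter table[i]'s ways forward into table[i+len(word)]
def acScatter (cs : List Char) (ws : List String) (i : Nat)
    (tb : List (List (List String))) : List (List (List String)) :=
  ws.foldl (fun tb2 w =>
    -- 'if i + len(word) <= len(target) and current_substring.startswith(word)'
    if i + w.toList.length ≤ cs.length ∧ PySem.Chars.startswith (cs.drop i) w.toList then
      -- 'table[i + len(word)] += [substring + [word] for substring in table[i]]'
      tb2.set (i + w.toList.length)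
        (tb2.getD (i + w.toList.length) [] ++ (tb2.getD i []).map (fun way => way ++ [w]))
    else tb2) tb

def all_construct_tabularised (target : String) (wordbank : List String) : List (List String) :=
  let cs := target.toList
  -- 'table = [[] for _ in range(len(target)+1)]; table[0] = [[]]'
  let table0 : List (List (List String)) :=
    (List.range (cs.length + 1)).map (fun j => if j = 0 then [[]] else [])
  -- 'for i in range(len(table)): if len(table[i]): …' ; current_substring = target[i:] is cs.drop i
  let final := (List.range (cs.length + 1)).foldl
    (fun tb i => if (tb.getD i []).length ≠ 0 then acScatter cs wordbank i tb else tb) table0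
  -- 'return table[-1]' (the table is non-empty, so pyGetD's default is unreachable)
  PySem.List.pyGetD final (-1) []

-- ===== PORT B =====
-- 'lens = set(len(word) for word in wordbank)'
def wordLens (wb : List String) : PySem.Set Nat :=
  PySem.Set.ofList (wb.map (fun w => w.toList.length))

-- f(j) of Source B: all ways to build the prefix target[:j]; memoization is dropped
-- (it only caches f's pure values), the recursion and iteration order are kept.
def altWays (cs : List Char) (wb : List String) (lens : PySem.Set Nat) : Nat → List (List String)
  | 0 => [[]]
  | j + 1 =>
    (List.range (j + 1)).attach.foldl
      (fun acc x =>
        -- 'if j - i in lens: for word in wordbank: if len(word) == j - i and target.startswith(word, i): …'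
        if PySem.Set.contains lens (j + 1 - x.1) then
          wb.foldl (fun acc2 w =>
            if w.toList.length = j + 1 - x.1 ∧ PySem.Chars.startswith (cs.drop x.1) w.toList then
              acc2 ++ (altWays cs wb lens x.1).map (fun way => way ++ [w])
            else acc2) acc
        else acc)
      []
  decreasing_by exact List.mem_range.mp x.2

def all_construct_tabularised_alt (target : String) (wordbank : List String) : List (List String) :=
  altWays target.toList wordbank (wordLens wordbank) target.toList.length

-- ===== PRECONDITION & SPEC =====
-- Pre_ excludes wordbanks containing the empty word (there the true set of ways is infinite and
-- A's finite list, with extra combinations ending in '', is an accident of its self-appending loop),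
-- except when no nonempty word is a prefix of a nonempty target, where both programs return [].
def Pre_all_construct_tabularised (target : String) (wordbank : List String) : Prop :=
  "" ∉ wordbank ∨
    (target ≠ "" ∧ ∀ w ∈ wordbank, ¬(w ≠ "" ∧ w.toList <+: target.toList))
instance (target : String) (wordbank : List String) : Decidable (Pre_all_construct_tabularised target wordbank) := by unfold Pre_all_construct_tabularised; infer_instance

def pvWitness_all_construct_tabularised : String × List String := ("abab", ["ab", "a", "b", "abab"])

def Spec_all_construct_tabularised (target : String) (wordbank : List String) (out : List (List String)) : Prop := out = all_construct_tabularised_alt target wordbank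
instance (target : String) (wordbank : List String) (out : List (List String)) : Decidable (Spec_all_construct_tabularised target wordbank out) := by unfold Spec_all_construct_tabularised; infer_instance

-- ===== CLAIM (what is proved, stated in full; the proofs are below) =====
def Claim_equal_all_construct_tabularised : Prop := ∀ (target : String) (wordbank : List String), Dom_all_construct_tabularised target wordbank → Pre_all_construct_tabularised target wordbank → Spec_all_construct_tabularised target wordbank (all_construct_tabularised target wordbank)

-- ===== LEMMAS AND PROOFS =====

-- contribution of loop index i to table entry j, using V as the list of ways at position i
def contribW (cs : List Char) (V : List (List String)) (i j : Nat) (ws : List String) : List (List String) :=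
  ws.flatMap (fun w =>
    if (i + w.toList.length ≤ cs.length ∧ PySem.Chars.startswith (cs.drop i) w.toList) ∧ i + w.toList.length = j then
      V.map (fun way => way ++ [w])
    else [])

-- the table A maintains, after the first k iterations of its outer loop, entry j
def Tfun (cs : List Char) (wb : List String) (k j : Nat) : List (List String) :=
  if j = 0 then [[]]
  else (List.range (min j k)).flatMap (fun i => contribW cs (altWays cs wb (wordLens wb) i) i j wb)

lemma contribW_cons (cs : List Char) (V : List (List String)) (i j : Nat) (w : String) (ws : List String) :
    contribW cs V i j (w :: ws) =
      (if (i + w.toList.length ≤ cs.length ∧ PySem.Chars.startswith (cs.drop i) w.toList) ∧ i + w.toList.length = j then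
        V.map (fun way => way ++ [w]) else []) ++ contribW cs V i j ws := by
  simp [contribW]

lemma getD_set_eq (tb : List (List (List String))) (m j : Nat) (v : List (List String)) :
    (tb.set m v).getD j [] = if j = m ∧ m < tb.length then v else tb.getD j [] := by
  rw [List.getD_eq_getElem?_getD, List.getD_eq_getElem?_getD, List.getElem?_set]
  split_ifs <;> simp_all

lemma acScatter_length (cs : List Char) (ws : List String) (i : Nat) (tb : List (List (List String))) :
    (acScatter cs ws i tb).length = tb.length := by
  induction ws generalizing tb with
  | nil => rfl
  | cons w ws ih =>
    unfold acScatter at *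
    simp only [List.foldl_cons]
    split
    · rw [ih]; simp
    · exact ih tb

-- A's inner word loop appends exactly contribW to every entry
lemma acScatter_getD (cs : List Char) (ws : List String) (hws : ∀ w ∈ ws, w ≠ "")
    (i : Nat) (tb : List (List (List String))) (htb : tb.length = cs.length + 1) (j : Nat) :
    (acScatter cs ws i tb).getD j [] = tb.getD j [] ++ contribW cs (tb.getD i []) i j ws := by
  induction ws generalizing tb with
  | nil => simp [acScatter, contribW]
  | cons w ws ih =>
    have hw : w ≠ "" := hws w (by simp)
    have hwlen : w.toList.length ≠ 0 := by
      simpa using fun h => hw (String.toList_eq_nil_iff.mp h)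
    unfold acScatter
    simp only [List.foldl_cons]
    by_cases hc : i + w.toList.length ≤ cs.length ∧ PySem.Chars.startswith (cs.drop i) w.toList
    · rw [if_pos hc]
      set tb' := tb.set (i + w.toList.length)
        (tb.getD (i + w.toList.length) [] ++ (tb.getD i []).map (fun way => way ++ [w])) with htb'
      have hlen' : tb'.length = cs.length + 1 := by rw [htb', List.length_set]; exact htb
      have hgi : tb'.getD i [] = tb.getD i [] := by
        rw [htb', getD_set_eq]
        rw [if_neg]; rintro ⟨h1, -⟩; omega
      have := ih (fun u hu => hws u (List.mem_cons_of_mem _ hu)) tb' hlen'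
      unfold acScatter at this
      rw [this, hgi, contribW_cons]
      by_cases hj : j = i + w.toList.length
      · subst hj
        rw [if_pos ⟨hc, rfl⟩]
        rw [htb', getD_set_eq, if_pos ⟨rfl, by omega⟩, List.append_assoc]
      · rw [if_neg (by rintro ⟨-, h⟩; exact hj h.symm)]
        rw [htb', getD_set_eq, if_neg (by rintro ⟨h1, -⟩; exact hj h1)]
        simp
    · rw [if_neg hc]
      have := ih (fun u hu => hws u (List.mem_cons_of_mem _ hu)) tb htb
      unfold acScatter at this
      rw [this, contribW_cons]
      rw [if_neg (by rintro ⟨h1, -⟩; exact hc h1)]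
      simp

-- B's condition 'len(word) == j - i and target.startswith(word, i)' is A's
-- 'fits and startswith' with last-word start i
lemma cond_iff (cs : List Char) (w : String) (i j : Nat) (hij : i < j) (hj : j ≤ cs.length) :
    (w.toList.length = j - i ∧ PySem.Chars.startswith (cs.drop i) w.toList = true) ↔
      ((i + w.toList.length ≤ cs.length ∧ PySem.Chars.startswith (cs.drop i) w.toList = true) ∧ i + w.toList.length = j) := by
  constructor
  · rintro ⟨hlen, hsw⟩
    exact ⟨⟨by omega, hsw⟩, by omega⟩
  · rintro ⟨⟨hle, hsw⟩, heq⟩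
    exact ⟨by omega, hsw⟩

-- B's word loop, run from accumulator acc, appends exactly contribW
lemma bfold_eq (cs : List Char) (V : List (List String)) (i j : Nat)
    (hij : i < j) (hj : j ≤ cs.length) (acc : List (List String))
    (ws : List String) :
    ws.foldl (fun acc2 w =>
      if w.toList.length = j - i ∧ PySem.Chars.startswith (cs.drop i) w.toList then
        acc2 ++ V.map (fun way => way ++ [w])
      else acc2) acc
    = acc ++ contribW cs V i j ws := by
  induction ws generalizing acc with
  | nil => simp [contribW]
  | cons w ws ih =>
    simp only [List.foldl_cons]
    rw [contribW_cons]
    by_cases hc : w.toList.length = j - i ∧ PySem.Chars.startswith (cs.drop i) w.toList = true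
    · rw [if_pos hc, ih, if_pos ((cond_iff cs w i j hij hj).mp hc), List.append_assoc]
    · rw [if_neg hc, ih, if_neg (fun h => hc ((cond_iff cs w i j hij hj).mpr h))]
      simp

-- when no word has length j - i, position i contributes nothing (B's 'if j - i in lens' skip)
lemma contribW_nil_of_no_len (cs : List Char) (V : List (List String)) (i j : Nat)
    (ws : List String) (hij : i < j) (h : ∀ w ∈ ws, w.toList.length ≠ j - i) :
    contribW cs V i j ws = [] := by
  simp only [contribW, List.flatMap_eq_nil_iff]
  intro w hw
  rw [if_neg]
  rintro ⟨-, heq⟩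
  exact h w hw (by omega)

lemma not_contains_wordLens (wb : List String) (L : Nat)
    (h : PySem.Set.contains (wordLens wb) L = false) : ∀ w ∈ wb, w.toList.length ≠ L := by
  intro w hw heq
  have : L ∈ wordLens wb := by
    rw [wordLens, PySem.Set.mem_ofList]
    exact List.mem_map.mpr ⟨w, hw, heq⟩
  rw [← PySem.Set.contains_iff] at this
  rw [h] at this
  exact Bool.false_ne_true this

lemma altWays_succ_eq (cs : List Char) (wb : List String) (j : Nat) (hj : j + 1 ≤ cs.length) :
    altWays cs wb (wordLens wb) (j + 1) =
      (List.range (j + 1)).flatMap (fun i => contribW cs (altWays cs wb (wordLens wb) i) i (j + 1) wb) := by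
  conv_lhs => rw [altWays]
  suffices h : ∀ l : List {x // x ∈ List.range (j + 1)}, ∀ acc : List (List String),
      l.foldl (fun acc x =>
        if PySem.Set.contains (wordLens wb) (j + 1 - x.1) then
          wb.foldl (fun acc2 w =>
            if w.toList.length = j + 1 - x.1 ∧ PySem.Chars.startswith (cs.drop x.1) w.toList then
              acc2 ++ (altWays cs wb (wordLens wb) x.1).map (fun way => way ++ [w])
            else acc2) acc
        else acc) acc
      = acc ++ l.flatMap (fun x => contribW cs (altWays cs wb (wordLens wb) x.1) x.1 (j + 1) wb) by
    rw [h (List.range (j + 1)).attach []]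
    simp only [List.nil_append, List.flatMap_subtype, List.unattach_attach]
  intro l
  induction l with
  | nil => simp
  | cons x l ih =>
    intro acc
    simp only [List.foldl_cons, List.flatMap_cons]
    cases hsk : PySem.Set.contains (wordLens wb) (j + 1 - x.1) with
    | true =>
      rw [if_pos rfl]
      rw [bfold_eq cs (altWays cs wb (wordLens wb) x.1) x.1 (j + 1) (List.mem_range.mp x.2) hj acc,
        ih, List.append_assoc]
    | false =>
      rw [if_neg (by simp), ih,
        contribW_nil_of_no_len cs (altWays cs wb (wordLens wb) x.1) x.1 (j + 1) wb
          (List.mem_range.mp x.2) (not_contains_wordLens wb _ hsk), List.nil_append]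

lemma Tfun_diag (cs : List Char) (wb : List String) (k : Nat) (hk : k ≤ cs.length) :
    Tfun cs wb k k = altWays cs wb (wordLens wb) k := by
  cases k with
  | zero => simp [Tfun, altWays]
  | succ j =>
    rw [Tfun, if_neg (Nat.succ_ne_zero j), Nat.min_self, ← altWays_succ_eq cs wb j hk]

lemma contribW_nil_of_le (cs : List Char) (V : List (List String)) (k j : Nat)
    (ws : List String) (hws : ∀ w ∈ ws, w ≠ "") (hjk : j ≤ k) :
    contribW cs V k j ws = [] := by
  simp only [contribW, List.flatMap_eq_nil_iff]
  intro w hw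
  rw [if_neg]
  rintro ⟨-, heq⟩
  exact hws w hw (String.toList_eq_nil_iff.mp (List.length_eq_zero_iff.mp (by omega)))

lemma contribW_nil_V (cs : List Char) (i j : Nat) (ws : List String) :
    contribW cs [] i j ws = [] := by
  simp only [contribW, List.flatMap_eq_nil_iff]
  intro w hw
  split <;> simp

lemma Tfun_step (cs : List Char) (wb : List String) (hwb : "" ∉ wb) (k j : Nat) :
    Tfun cs wb (k + 1) j = Tfun cs wb k j ++ contribW cs (altWays cs wb (wordLens wb) k) k j wb := by
  have hws : ∀ w ∈ wb, w ≠ "" := fun w hw h => hwb (h ▸ hw)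
  by_cases hj0 : j = 0
  · subst hj0
    rw [contribW_nil_of_le cs (altWays cs wb (wordLens wb) k) k 0 wb hws (Nat.zero_le k)]
    simp [Tfun]
  · rw [Tfun, Tfun, if_neg hj0, if_neg hj0]
    by_cases h : j ≤ k
    · rw [Nat.min_eq_left h, Nat.min_eq_left (by omega),
        contribW_nil_of_le cs (altWays cs wb (wordLens wb) k) k j wb hws h, List.append_nil]
    · rw [Nat.min_eq_right (by omega), Nat.min_eq_right (by omega), List.range_succ,
        List.flatMap_append, List.flatMap_singleton]


-- invariant of A's outer loop: after k iterations the table holds Tfun · k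
lemma state_eq (cs : List Char) (wb : List String) (hwb : "" ∉ wb) (k : Nat) (hk : k ≤ cs.length + 1) :
    ((List.range k).foldl
      (fun tb i => if (tb.getD i []).length ≠ 0 then acScatter cs wb i tb else tb)
      ((List.range (cs.length + 1)).map (fun j => if j = 0 then [[]] else []))).length = cs.length + 1
    ∧ ∀ j, ((List.range k).foldl
      (fun tb i => if (tb.getD i []).length ≠ 0 then acScatter cs wb i tb else tb)
      ((List.range (cs.length + 1)).map (fun j => if j = 0 then [[]] else []))).getD j [] = Tfun cs wb k j := by
  have hws : ∀ w ∈ wb, w ≠ "" := fun w hw h => hwb (h ▸ hw)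
  induction k with
  | zero =>
    simp only [List.range_zero, List.foldl_nil]
    constructor
    · simp
    · intro j
      rcases Nat.lt_or_ge j (cs.length + 1) with hj | hj
      · simp [Tfun, List.getD_eq_getElem?_getD, hj]
      · have h0 : j ≠ 0 := by omega
        rw [List.getD_eq_getElem?_getD, List.getElem?_map,
          List.getElem?_eq_none (by simpa using (by omega : cs.length + 1 ≤ j))]
        simp [Tfun, h0]
  | succ k ih =>
    obtain ⟨hlen, hent⟩ := ih (by omega)
    rw [show List.range (k + 1) = List.range k ++ [k] from List.range_succ,
      List.foldl_append, List.foldl_cons, List.foldl_nil]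
    have hkk : Tfun cs wb k k = altWays cs wb (wordLens wb) k := Tfun_diag cs wb k (by omega)
    by_cases hg : ((((List.range k).foldl
        (fun tb i => if (tb.getD i []).length ≠ 0 then acScatter cs wb i tb else tb)
        ((List.range (cs.length + 1)).map (fun j => if j = 0 then [[]] else []))).getD k []).length ≠ 0)
    · rw [if_pos hg]
      refine ⟨by rw [acScatter_length, hlen], fun j => ?_⟩
      rw [acScatter_getD cs wb hws k _ hlen j, hent j, hent k, hkk, ← Tfun_step cs wb hwb k j]
    · rw [if_neg hg]
      have hnil : altWays cs wb (wordLens wb) k = [] := by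
        by_contra hne
        exact hg (by rw [hent k, hkk]; simpa using hne)
      refine ⟨hlen, fun j => ?_⟩
      rw [hent j, Tfun_step cs wb hwb k j, hnil, contribW_nil_V, List.append_nil]

-- ===== the unconstructible region admitted by Pre_'s second disjunct =====

-- B returns no ways for any nonempty prefix when no nonempty word is a prefix of the target
lemma altWays_nil (cs : List Char) (wb : List String)
    (hnp : ∀ w ∈ wb, ¬(w ≠ "" ∧ w.toList <+: cs)) :
    ∀ j, 1 ≤ j → j ≤ cs.length → altWays cs wb (wordLens wb) j = [] := by
  intro j
  induction j using Nat.strong_induction_on with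
  | _ j ih =>
    intro hj1 hjn
    cases j with
    | zero => omega
    | succ m =>
      have hcontrib : ∀ i, i < m + 1 → contribW cs (altWays cs wb (wordLens wb) i) i (m + 1) wb = [] := by
        intro i hi
        cases Nat.eq_zero_or_pos i with
        | inr hpos =>
          rw [ih i (by omega) hpos (by omega), contribW_nil_V]
        | inl h0 =>
          subst h0
          simp only [contribW, List.flatMap_eq_nil_iff]
          intro w hw
          rw [if_neg]
          rintro ⟨⟨hle, hsw⟩, heq⟩
          refine hnp w hw ⟨?_, by simpa using (PySem.Chars.startswith_iff _ _).mp hsw⟩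
          intro hemp
          rw [hemp] at heq
          simp at heq
      rw [altWays_succ_eq cs wb m hjn, List.flatMap_eq_nil_iff]
      intro x hx
      exact hcontrib x (List.mem_range.mp hx)

-- A's scatter at i = 0 leaves every entry j ≥ 1 unchanged when no word can match
lemma acScatter_zero_keeps (cs : List Char) (ws : List String)
    (hnp : ∀ w ∈ ws, ¬(w ≠ "" ∧ w.toList <+: cs))
    (tb : List (List (List String))) (j : Nat) (hj : 1 ≤ j) :
    (acScatter cs ws 0 tb).getD j [] = tb.getD j [] := by
  induction ws generalizing tb with
  | nil => rfl
  | cons w ws ih =>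
    unfold acScatter
    simp only [List.foldl_cons]
    by_cases hw : w = ""
    · subst hw
      rw [if_pos ⟨by simp, (PySem.Chars.startswith_iff _ _).mpr (by simp)⟩]
      have h2 := ih (fun u hu => hnp u (List.mem_cons_of_mem _ hu))
        (tb.set (0 + "".toList.length)
          (tb.getD (0 + "".toList.length) [] ++ (tb.getD 0 []).map (fun way => way ++ [""])))
      unfold acScatter at h2
      rw [h2, getD_set_eq, if_neg (by rintro ⟨h1, -⟩; simp at h1; omega)]
    · rw [if_neg (by
        rintro ⟨-, hsw⟩
        exact hnp w (by simp) ⟨hw, by simpa using (PySem.Chars.startswith_iff _ _).mp hsw⟩)]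
      have := ih (fun u hu => hnp u (List.mem_cons_of_mem _ hu)) tb
      unfold acScatter at this
      rw [this]

-- A's table keeps every entry j ≥ 1 empty when no nonempty word is a prefix of the target
lemma state_nil (cs : List Char) (wb : List String)
    (hnp : ∀ w ∈ wb, ¬(w ≠ "" ∧ w.toList <+: cs)) (k : Nat) :
    ((List.range k).foldl
      (fun tb i => if (tb.getD i []).length ≠ 0 then acScatter cs wb i tb else tb)
      ((List.range (cs.length + 1)).map (fun j => if j = 0 then [[]] else []))).length = cs.length + 1
    ∧ ∀ j, 1 ≤ j → ((List.range k).foldl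
      (fun tb i => if (tb.getD i []).length ≠ 0 then acScatter cs wb i tb else tb)
      ((List.range (cs.length + 1)).map (fun j => if j = 0 then [[]] else []))).getD j [] = [] := by
  induction k with
  | zero =>
    simp only [List.range_zero, List.foldl_nil]
    refine ⟨by simp, fun j hj => ?_⟩
    rcases Nat.lt_or_ge j (cs.length + 1) with h | h
    · have h0 : j ≠ 0 := by omega
      simp [List.getD_eq_getElem?_getD, h, h0]
    · rw [List.getD_eq_getElem?_getD, List.getElem?_map,
        List.getElem?_eq_none (by simpa using h)]
      rfl
  | succ k ih =>
    obtain ⟨hlen, hent⟩ := ih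
    rw [show List.range (k + 1) = List.range k ++ [k] from List.range_succ,
      List.foldl_append, List.foldl_cons, List.foldl_nil]
    cases Nat.eq_zero_or_pos k with
    | inr hpos =>
      rw [if_neg (by rw [hent k hpos]; simp)]
      exact ⟨hlen, hent⟩
    | inl h0 =>
      subst h0
      split
      · exact ⟨by rw [acScatter_length]; exact hlen,
          fun j hj => by rw [acScatter_zero_keeps cs wb hnp _ j hj]; exact hent j hj⟩
      · exact ⟨hlen, hent⟩

-- ===== VERDICT (by name: the statement is the Claim_ definition above) =====
theorem all_construct_tabularised_spec : Claim_equal_all_construct_tabularised := by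
  intro target wordbank _hdom hpre
  unfold Spec_all_construct_tabularised all_construct_tabularised all_construct_tabularised_alt
  have hlg : ∀ (final : List (List (List String))), final.length = target.toList.length + 1 →
      PySem.List.pyGetD final (-1) [] = final.getD target.toList.length [] := by
    intro final hlen
    have hne : final ≠ [] := by intro h; rw [h] at hlen; simp at hlen
    rw [PySem.List.pyGetD_neg_one final [] hne, List.getLast_eq_getElem,
      List.getD_eq_getElem _ _ (by omega)]
    congr 1
    omega
  rcases hpre with hpre | ⟨hts, hnp⟩
  · obtain ⟨hlen, hent⟩ :=
      state_eq target.toList wordbank hpre (target.toList.length + 1) le_rfl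
    rw [hlg _ hlen, hent target.toList.length]
    cases hn : target.toList.length with
    | zero => simp [Tfun, altWays]
    | succ m =>
      rw [Tfun, if_neg (Nat.succ_ne_zero m), Nat.min_eq_left (by omega),
        ← altWays_succ_eq target.toList wordbank m (by omega)]
  · have hnp' : ∀ w ∈ wordbank, ¬(w ≠ "" ∧ w.toList <+: target.toList) := hnp
    have hn1 : 1 ≤ target.toList.length := by
      rcases Nat.eq_zero_or_pos target.toList.length with h | h
      · exact absurd (String.toList_eq_nil_iff.mp (List.length_eq_zero_iff.mp h)) hts
      · exact h
    obtain ⟨hlen, hent⟩ := state_nil target.toList wordbank hnp' (target.toList.length + 1)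
    rw [hlg _ hlen, hent target.toList.length hn1,
      altWays_nil target.toList wordbank hnp' target.toList.length hn1 le_rfl]
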